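-- pv_equiv track=rewrite | github.com/nastyaglushak/Python_code | IndTHRProcFun.py | THRsortSmall
-- ===== SOURCE A (Python) =====
-- def THRsortSmall(data_analysis, THR_start, THR_finish):
--     data_range=[]
--     for i in range(0,4):
--         data_range.append(0)
--
--     for i in range (0, len(data_analysis)):
--         if (THR_start<=data_analysis[i]<=THR_start+1):data_range[0]+=1
--         if (THR_start+2<=data_analysis[i]<=THR_start+3):data_range[1]+=1
--         if (THR_start+4<=data_analysis[i]<=THR_start+5):data_range[2]+=1
--         if (THR_start+6<=data_analysis[i]<=THR_start+7):data_range[3]+=1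
--     return(data_range)
-- ===== SOURCE B (Python) =====
-- def THRsortSmall(data_analysis, THR_start, THR_finish):
--     bins = [(THR_start, THR_start + 1),
--             (THR_start + 2, THR_start + 3),
--             (THR_start + 4, THR_start + 5),
--             (THR_start + 6, THR_start + 7)]
--     return [sum(1 for x in data_analysis if lo <= x <= hi) for (lo, hi) in bins]
-- ===== Notes on version B (the rewrite author's own statement) =====
-- stated objective: idiomatic
-- what changed: A makes one pass over the data maintaining four counters updated by four chained range checks per element; B defines the four bins as (lo,hi) pairs and, per bin, counts the elements in range with one scan each (bins-outermost repeated scans instead of a single four-check pass).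
import Mathlib
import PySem

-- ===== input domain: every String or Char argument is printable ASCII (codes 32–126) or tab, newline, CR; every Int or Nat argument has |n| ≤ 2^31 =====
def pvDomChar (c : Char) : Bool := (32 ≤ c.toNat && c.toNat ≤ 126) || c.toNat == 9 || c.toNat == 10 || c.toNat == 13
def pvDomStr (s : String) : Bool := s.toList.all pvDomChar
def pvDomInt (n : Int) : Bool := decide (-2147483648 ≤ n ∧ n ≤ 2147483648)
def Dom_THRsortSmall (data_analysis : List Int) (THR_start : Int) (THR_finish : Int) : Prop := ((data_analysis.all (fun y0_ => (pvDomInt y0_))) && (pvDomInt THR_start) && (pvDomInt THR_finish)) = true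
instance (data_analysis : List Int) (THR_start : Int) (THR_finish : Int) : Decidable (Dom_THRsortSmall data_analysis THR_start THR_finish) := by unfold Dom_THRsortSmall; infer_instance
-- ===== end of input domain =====

-- B counts each of the four bins with its own scan over (lo,hi) pairs instead of A's
-- single pass with four chained-comparison counters (objective: idiomatic; same cost).


-- ===== PORT A =====
-- one pass over the data; four counters, each updated by its own chained range check
def THRsortSmallStep (THR_start : Int) (r : Int × Int × Int × Int) (x : Int) :
    Int × Int × Int × Int :=
  let r := if THR_start ≤ x ∧ x ≤ THR_start + 1 then (r.1 + 1, r.2.1, r.2.2.1, r.2.2.2) else r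
  let r := if THR_start + 2 ≤ x ∧ x ≤ THR_start + 3 then (r.1, r.2.1 + 1, r.2.2.1, r.2.2.2) else r
  let r := if THR_start + 4 ≤ x ∧ x ≤ THR_start + 5 then (r.1, r.2.1, r.2.2.1 + 1, r.2.2.2) else r
  let r := if THR_start + 6 ≤ x ∧ x ≤ THR_start + 7 then (r.1, r.2.1, r.2.2.1, r.2.2.2 + 1) else r
  r

def THRsortSmall (data_analysis : List Int) (THR_start : Int) (THR_finish : Int) : List Int :=
  let r := data_analysis.foldl (THRsortSmallStep THR_start) (0, 0, 0, 0)
  [r.1, r.2.1, r.2.2.1, r.2.2.2]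

-- ===== PORT B =====
-- the four bins as (lo, hi) pairs; one counting scan of the data per bin
def THRsortSmall_alt (data_analysis : List Int) (THR_start : Int) (THR_finish : Int) : List Int :=
  [(THR_start, THR_start + 1), (THR_start + 2, THR_start + 3),
   (THR_start + 4, THR_start + 5), (THR_start + 6, THR_start + 7)].map
    (fun b => (data_analysis.countP (fun x => decide (b.1 ≤ x ∧ x ≤ b.2)) : Int))

-- ===== PRECONDITION & SPEC =====
def Spec_THRsortSmall (data_analysis : List Int) (THR_start : Int) (THR_finish : Int) (out : List Int) : Prop := out = THRsortSmall_alt data_analysis THR_start THR_finish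
instance (data_analysis : List Int) (THR_start : Int) (THR_finish : Int) (out : List Int) : Decidable (Spec_THRsortSmall data_analysis THR_start THR_finish out) := by unfold Spec_THRsortSmall; infer_instance

-- ===== CLAIM (what is proved, stated in full; the proofs are below) =====
def Claim_equal_THRsortSmall : Prop := ∀ (data_analysis : List Int) (THR_start : Int) (THR_finish : Int), Dom_THRsortSmall data_analysis THR_start THR_finish → Spec_THRsortSmall data_analysis THR_start THR_finish (THRsortSmall data_analysis THR_start THR_finish)

-- ===== LEMMAS AND PROOFS =====
theorem step_eq (s x a b c d : Int) :
    THRsortSmallStep s (a, b, c, d) x =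
      (a + (if s ≤ x ∧ x ≤ s + 1 then 1 else 0),
       b + (if s + 2 ≤ x ∧ x ≤ s + 3 then 1 else 0),
       c + (if s + 4 ≤ x ∧ x ≤ s + 5 then 1 else 0),
       d + (if s + 6 ≤ x ∧ x ≤ s + 7 then 1 else 0)) := by
  simp only [THRsortSmallStep]
  split_ifs <;> simp

theorem foldl_step_eq (s : Int) (l : List Int) (a b c d : Int) :
    l.foldl (THRsortSmallStep s) (a, b, c, d) =
      (a + (l.countP (fun x => decide (s ≤ x ∧ x ≤ s + 1)) : Int),
       b + (l.countP (fun x => decide (s + 2 ≤ x ∧ x ≤ s + 3)) : Int),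
       c + (l.countP (fun x => decide (s + 4 ≤ x ∧ x ≤ s + 5)) : Int),
       d + (l.countP (fun x => decide (s + 6 ≤ x ∧ x ≤ s + 7)) : Int)) := by
  induction l generalizing a b c d with
  | nil => simp
  | cons x t ih =>
    rw [List.foldl_cons, step_eq, ih]
    simp only [List.countP_cons, Prod.mk.injEq, decide_eq_true_eq]
    refine ⟨?_, ?_, ?_, ?_⟩ <;> (push_cast; split_ifs <;> omega)

-- ===== VERDICT (by name: the statement is the Claim_ definition above) =====
theorem THRsortSmall_spec : Claim_equal_THRsortSmall := by
  intro d s f _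
  show _ = _
  simp [THRsortSmall, THRsortSmall_alt, foldl_step_eq]
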